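-- pv_equiv track=rewrite | github.com/vilkoz/hashcode2019 | magic.py | form_tag_map
-- ===== SOURCE A (Python) =====
-- def form_tag_map(slides):
--     tag_map = {}
--     for s in slides:
--         for tag in s["tags"]:
--             if tag not in tag_map:
--                 tag_map[tag] = [s]
--             else:
--                 tag_map[tag].append(s)
--     for tag in tag_map:
--         tag_map[tag] = sorted(tag_map[tag], key=lambda slide: len(slide['tags']))
--     return tag_map
-- ===== SOURCE B (Python) =====
-- def form_tag_map(slides):
--     tag_map = {}
--     for s in slides:
--         for tag in s["tags"]:
--             tag_map.setdefault(tag, [])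
--     for s in sorted(slides, key=lambda slide: len(slide["tags"])):
--         for tag in s["tags"]:
--             tag_map[tag].append(s)
--     return tag_map
-- ===== Notes on version B (the rewrite author's own statement) =====
-- stated objective: alternative
-- what changed: A builds per-tag buckets and then sorts each bucket; B registers the tag keys once, performs a single stable sort of all slides by tag count, and fills every bucket with one in-order appending pass (stability makes each bucket come out already sorted).
import Mathlib
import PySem

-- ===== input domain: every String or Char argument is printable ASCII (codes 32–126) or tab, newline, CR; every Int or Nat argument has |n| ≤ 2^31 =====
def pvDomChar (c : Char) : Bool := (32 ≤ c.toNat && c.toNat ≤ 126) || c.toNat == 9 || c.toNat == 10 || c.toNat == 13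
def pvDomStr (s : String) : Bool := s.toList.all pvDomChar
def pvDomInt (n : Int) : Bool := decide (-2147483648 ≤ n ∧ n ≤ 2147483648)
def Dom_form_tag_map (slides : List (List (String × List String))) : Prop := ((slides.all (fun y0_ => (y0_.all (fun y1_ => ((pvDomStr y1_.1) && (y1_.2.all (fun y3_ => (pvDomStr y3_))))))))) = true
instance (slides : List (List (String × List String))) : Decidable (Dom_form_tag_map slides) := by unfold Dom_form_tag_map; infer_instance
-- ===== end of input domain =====

-- B replaces A's build-buckets-then-sort-each-bucket with registering the keys once and a SINGLE
-- stable sort of all slides followed by one appending pass (stability + in-order appends make every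
-- bucket come out in A's per-bucket sorted order).

-- shared transliteration of the Python subscript s["tags"] (dict lookup = first match);
-- Pre_form_tag_map guarantees the key is present, so the [] default is never consulted there
def pyTags (s : List (String × List String)) : List String :=
  (PySem.Dict.mk s).getD "tags" []

-- ===== PORT A =====
def form_tag_map (slides : List (List (String × List String))) : List (String × List (List (String × List String))) :=
  let tm1 : PySem.Dict String (List (List (String × List String))) :=
    slides.foldl (fun d s =>
      (pyTags s).foldl (fun d tag =>
        if d.contains tag = false then d.insert tag [s]
        else d.modify tag [] (fun v => v ++ [s])) d) PySem.Dict.empty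
  let tm2 :=
    tm1.keys.foldl (fun d tag =>
      d.insert tag (PySem.List.sorted (d.getD tag []) (fun sl => (pyTags sl).length))) tm1
  tm2.items

-- ===== PORT B =====
def form_tag_map_alt (slides : List (List (String × List String))) : List (String × List (List (String × List String))) :=
  let d0 : PySem.Dict String (List (List (String × List String))) :=
    slides.foldl (fun d s =>
      (pyTags s).foldl (fun d tag => d.setdefault tag []) d) PySem.Dict.empty
  let ss := PySem.List.sorted slides (fun sl => (pyTags sl).length)
  let d :=
    ss.foldl (fun d s =>
      (pyTags s).foldl (fun d tag => d.modify tag [] (fun v => v ++ [s])) d) d0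
  d.items

-- ===== PRECONDITION & SPEC =====
-- Pre_ excludes exactly the inputs where some slide lacks the "tags" key, on which Python A raises KeyError
def Pre_form_tag_map (slides : List (List (String × List String))) : Prop :=
  ∀ s ∈ slides, s.any (fun p => p.1 == "tags") = true
instance (slides : List (List (String × List String))) : Decidable (Pre_form_tag_map slides) := by
  unfold Pre_form_tag_map; infer_instance
def pvWitness_form_tag_map : (List (List (String × List String))) := [[("tags", ["a"])]]

def Spec_form_tag_map (slides : List (List (String × List String))) (out : List (String × List (List (String × List String)))) : Prop := out = form_tag_map_alt slides
instance (slides : List (List (String × List String))) (out : List (String × List (List (String × List String)))) : Decidable (Spec_form_tag_map slides out) := by unfold Spec_form_tag_map; infer_instance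

-- ===== CLAIM (what is proved, stated in full; the proofs are below) =====
def Claim_equal_form_tag_map : Prop := ∀ (slides : List (List (String × List String))), Dom_form_tag_map slides → Pre_form_tag_map slides → Spec_form_tag_map slides (form_tag_map slides)

-- ===== LEMMAS AND PROOFS =====

-- the (tag, slide) pairs the nested loops traverse, in order
def pvPairs (l : List (List (String × List String))) : List (String × List (String × List String)) :=
  l.flatMap (fun s => (pyTags s).map (fun t => (t, s)))

-- the bucket a tag collects over a slide list
def pvBucket (t : String) (l : List (List (String × List String))) : List (List (String × List String)) :=
  ((pvPairs l).filter (fun p => p.1 == t)).map (fun p => p.2)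

lemma pvPairs_append (l₁ l₂ : List (List (String × List String))) :
    pvPairs (l₁ ++ l₂) = pvPairs l₁ ++ pvPairs l₂ := by
  simp [pvPairs]

lemma pvBucket_append (t : String) (l₁ l₂ : List (List (String × List String))) :
    pvBucket t (l₁ ++ l₂) = pvBucket t l₁ ++ pvBucket t l₂ := by
  simp [pvBucket, pvPairs_append]

lemma pvBucket_mem {t : String} {l : List (List (String × List String))}
    {x : List (String × List String)} (hx : x ∈ pvBucket t l) : x ∈ l := by
  simp only [pvBucket, List.mem_map, List.mem_filter] at hx
  obtain ⟨p, ⟨hp, -⟩, rfl⟩ := hx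
  simp only [pvPairs, List.mem_flatMap, List.mem_map] at hp
  obtain ⟨s, hs, u, -, rfl⟩ := hp
  exact hs

lemma pvBucket_single (t : String) (s : List (String × List String)) :
    ∀ x ∈ pvBucket t [s], x = s := by
  intro x hx
  simp only [pvBucket, List.mem_map, List.mem_filter] at hx
  obtain ⟨p, ⟨hp, -⟩, rfl⟩ := hx
  simp only [pvPairs, List.flatMap_cons, List.flatMap_nil, List.append_nil, List.mem_map] at hp
  obtain ⟨u, -, rfl⟩ := hp
  rfl

-- flatten the nested slide/tag loops into one loop over pvPairs
lemma pvFoldl_nested {ν : Type} (g : PySem.Dict String ν → String → List (String × List String) → PySem.Dict String ν)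
    (l : List (List (String × List String))) (d : PySem.Dict String ν) :
    l.foldl (fun d s => (pyTags s).foldl (fun d tag => g d tag s) d) d
      = (pvPairs l).foldl (fun d p => g d p.1 p.2) d := by
  induction l generalizing d with
  | nil => rfl
  | cons s l ih =>
    simp only [pvPairs, List.flatMap_cons, List.foldl_append, List.foldl_cons, List.foldl_map]
    simp only [pvPairs] at ih
    exact ih _

-- A's first-loop body collapses to the modify step (the new-key branch appends to the [] default)
lemma pvStepA (d : PySem.Dict String (List (List (String × List String)))) (tag : String)
    (s : List (String × List String)) :
    (if d.contains tag = false then d.insert tag [s] else d.modify tag [] (fun v => v ++ [s]))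
      = d.modify tag [] (fun v => v ++ [s]) := by
  by_cases h : d.contains tag = false
  · simp [h, PySem.Dict.modify, PySem.Dict.getD_of_not_contains d _ h]
  · simp [h]

-- getD through a fold that never touches key t
lemma pvGetD_foldl_untouched {ν : Type} (ks : List String) (v : PySem.Dict String ν → String → ν)
    (d : PySem.Dict String ν) (t : String) (d0 : ν) (ht : t ∉ ks) :
    (ks.foldl (fun d k => d.insert k (v d k)) d).getD t d0 = d.getD t d0 := by
  induction ks generalizing d with
  | nil => rfl
  | cons k ks ih =>
    simp only [List.mem_cons, not_or] at ht
    simp only [List.foldl_cons, ih _ ht.2, PySem.Dict.getD_insert, if_neg ht.1]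

-- getD after A's second loop (distinct keys, each re-inserted once)
lemma pvGetD_phase2 (ks : List String) (hnd : ks.Nodup)
    (g : List (List (String × List String)) → List (List (String × List String)))
    (d : PySem.Dict String (List (List (String × List String)))) (t : String) :
    (ks.foldl (fun d k => d.insert k (g (d.getD k []))) d).getD t []
      = if t ∈ ks then g (d.getD t []) else d.getD t [] := by
  induction ks generalizing d with
  | nil => simp
  | cons k ks ih =>
    rcases List.nodup_cons.mp hnd with ⟨hk, hnd'⟩
    by_cases ht : t = k
    · subst ht
      rw [List.foldl_cons, pvGetD_foldl_untouched ks _ _ _ _ hk]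
      simp
    · rw [List.foldl_cons, ih hnd']
      simp [PySem.Dict.getD_insert, ht, List.mem_cons]

-- setdefault loop: values at every key unchanged
lemma pvGetD_setdefault_loop (l : List (String × List (String × List String)))
    (d : PySem.Dict String (List (List (String × List String)))) (t : String) :
    (l.foldl (fun d p => d.setdefault p.1 []) d).getD t [] = d.getD t [] := by
  induction l generalizing d with
  | nil => rfl
  | cons p l ih =>
    rw [List.foldl_cons, ih]
    by_cases h : d.contains p.1 = true
    · rw [PySem.Dict.setdefault_of_contains d _ h]
    · rw [PySem.Dict.setdefault_of_not_contains d _ (by simpa using h)]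
      rw [PySem.Dict.getD_insert]
      by_cases ht : t = p.1
      · subst ht; simp [PySem.Dict.getD_of_not_contains d _ (by simpa using h)]
      · simp [ht]

lemma pvKeys_setdefault (d : PySem.Dict String (List (List (String × List String)))) (k : String) :
    (d.setdefault k ([] : List (List (String × List String)))).keys = PySem.Set.add d.keys k := by
  by_cases h : d.contains k = true
  · rw [PySem.Dict.setdefault_of_contains d _ h]
    have hm : k ∈ d.keys := (PySem.Dict.contains_iff_mem_keys d k).mp h
    simp [PySem.Set.add, PySem.Set.contains, hm]
  · have h' : d.contains k = false := by simpa using h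
    rw [PySem.Dict.setdefault_of_not_contains d _ h', PySem.Dict.keys_insert_of_not_contains d _ h']
    have hm : k ∉ d.keys := fun hm =>
      absurd ((PySem.Dict.contains_iff_mem_keys d k).mpr hm) (by simp [h'])
    simp [PySem.Set.add, PySem.Set.contains, hm]

lemma pvKeys_setdefault_loop (l : List (String × List (String × List String)))
    (d : PySem.Dict String (List (List (String × List String)))) :
    (l.foldl (fun d p => d.setdefault p.1 []) d).keys
      = PySem.Set.update d.keys (l.map (fun p => p.1)) := by
  induction l generalizing d with
  | nil => rfl
  | cons p l ih => simp only [List.foldl_cons, List.map_cons, PySem.Set.update, ih, pvKeys_setdefault]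

-- updating a set with elements it already has is the identity
lemma pvSet_update_subset (K : PySem.Set String) (l : List String) (h : ∀ x ∈ l, x ∈ K) :
    PySem.Set.update K l = K := by
  induction l with
  | nil => rfl
  | cons x l ih =>
    have hx : x ∈ K := h x (by simp)
    simp only [PySem.Set.update, List.foldl_cons] at ih ⊢
    rw [show PySem.Set.add K x = K by simp [PySem.Set.add, PySem.Set.contains, hx]]
    exact ih (fun y hy => h y (by simp [hy]))

lemma pvPairs_fst (l : List (List (String × List String))) :
    (pvPairs l).map (fun p => p.1) = l.flatMap pyTags := by
  simp [pvPairs, List.map_flatMap, Function.comp_def]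

-- ==== the stable-sort / bucket commutation ====

-- where insertBy puts an element of a key-sorted list
lemma pvInsertBy_split (s : List (String × List String)) (ys : List (List (String × List String)))
    (hp : ys.Pairwise (fun a b => (pyTags a).length ≤ (pyTags b).length)) :
    ∃ as bs, ys = as ++ bs
      ∧ (∀ a ∈ as, (pyTags a).length ≤ (pyTags s).length)
      ∧ (∀ b ∈ bs, (pyTags s).length < (pyTags b).length)
      ∧ PySem.List.insertBy (fun a b => decide ((pyTags a).length < (pyTags b).length)) s ys
          = as ++ s :: bs := by
  induction ys with
  | nil => exact ⟨[], [], rfl, by simp, by simp, rfl⟩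
  | cons y ys ih =>
    rcases List.pairwise_cons.mp hp with ⟨hy, hp'⟩
    by_cases h : (pyTags s).length < (pyTags y).length
    · refine ⟨[], y :: ys, rfl, by simp, ?_, ?_⟩
      · intro b hb
        rcases List.mem_cons.mp hb with rfl | hb
        · exact h
        · exact lt_of_lt_of_le h (hy b hb)
      · simp [PySem.List.insertBy, h]
    · obtain ⟨as, bs, hsplit, ha, hb, hins⟩ := ih hp'
      refine ⟨y :: as, bs, by simp [hsplit], ?_, hb, ?_⟩
      · intro a haa
        rcases List.mem_cons.mp haa with rfl | haa
        · omega
        · exact ha a haa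
      · simp [PySem.List.insertBy, h, hins]

-- insertBy drops the new element exactly between the ≤-part and the >-part
lemma pvInsertBy_mid (s : List (String × List String)) (A B : List (List (String × List String)))
    (hA : ∀ a ∈ A, (pyTags a).length ≤ (pyTags s).length)
    (hB : ∀ b ∈ B, (pyTags s).length < (pyTags b).length) :
    PySem.List.insertBy (fun a b => decide ((pyTags a).length < (pyTags b).length)) s (A ++ B)
      = A ++ s :: B := by
  induction A with
  | nil =>
    cases B with
    | nil => rfl
    | cons b B => simp [PySem.List.insertBy, hB b (by simp)]
  | cons a A ih =>
    have hna : ¬ (pyTags s).length < (pyTags a).length := by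
      have := hA a (by simp); omega
    simp only [List.cons_append, PySem.List.insertBy, decide_eq_true_eq, if_neg hna,
      ih (fun x hx => hA x (by simp [hx]))]

-- inserting copies of s one by one lands them as a block between the parts
lemma pvInsert_copies (s : List (String × List String)) (xs A B : List (List (String × List String)))
    (hxs : ∀ x ∈ xs, x = s)
    (hA : ∀ a ∈ A, (pyTags a).length ≤ (pyTags s).length)
    (hB : ∀ b ∈ B, (pyTags s).length < (pyTags b).length) :
    xs.foldl (fun acc x =>
        PySem.List.insertBy (fun a b => decide ((pyTags a).length < (pyTags b).length)) x acc)
      (A ++ B) = A ++ xs ++ B := by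
  induction xs generalizing A with
  | nil => simp
  | cons x xs ih =>
    have hx : x = s := hxs x (by simp)
    subst hx
    rw [List.foldl_cons, pvInsertBy_mid x A B hA hB]
    have := ih (fun y hy => hxs y (by simp [hy])) (A := A ++ [x])
      (by intro a ha; rcases List.mem_append.mp ha with ha | ha
          · exact hA a ha
          · simp at ha; subst ha; rfl)
    simpa using this

-- the core lemma: a single stable sort of the slides sorts every bucket
lemma pvBucket_sorted (t : String) (l : List (List (String × List String))) :
    PySem.List.sorted (pvBucket t l) (fun sl => (pyTags sl).length)
      = pvBucket t (PySem.List.sorted l (fun sl => (pyTags sl).length)) := by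
  induction l using List.reverseRecOn with
  | nil => rfl
  | append_singleton l s ih =>
    rw [PySem.List.sorted_eq_foldl_insertBy (l ++ [s]), List.foldl_append,
      ← PySem.List.sorted_eq_foldl_insertBy l, List.foldl_cons, List.foldl_nil]
    obtain ⟨as, bs, hsplit, ha, hb, hins⟩ :=
      pvInsertBy_split s (PySem.List.sorted l (fun sl => (pyTags sl).length))
        (PySem.List.sorted_pairwise l (fun sl => (pyTags sl).length))
    rw [hins, pvBucket_append, PySem.List.sorted_eq_foldl_insertBy (pvBucket t l ++ pvBucket t [s]),
      List.foldl_append, ← PySem.List.sorted_eq_foldl_insertBy (pvBucket t l), ih, hsplit,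
      pvBucket_append]
    have hA : ∀ a ∈ pvBucket t as, (pyTags a).length ≤ (pyTags s).length :=
      fun a haa => ha a (pvBucket_mem haa)
    have hB : ∀ b ∈ pvBucket t bs, (pyTags s).length < (pyTags b).length :=
      fun b hbb => hb b (pvBucket_mem hbb)
    rw [pvInsert_copies s (pvBucket t [s]) (pvBucket t as) (pvBucket t bs)
      (pvBucket_single t s) hA hB]
    have : pvBucket t (as ++ s :: bs) = pvBucket t as ++ pvBucket t [s] ++ pvBucket t bs := by
      rw [show as ++ s :: bs = as ++ [s] ++ bs by simp, pvBucket_append, pvBucket_append]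
    rw [this]

-- ==== assembling the two dictionaries ====

lemma pvA_d1 (slides : List (List (String × List String))) :
    slides.foldl (fun d s =>
      (pyTags s).foldl (fun d tag =>
        if d.contains tag = false then d.insert tag [s]
        else d.modify tag [] (fun v => v ++ [s])) d) PySem.Dict.empty
    = (pvPairs slides).foldl (fun d p => d.modify p.1 [] (fun v => v ++ [p.2])) PySem.Dict.empty := by
  rw [show (fun (d : PySem.Dict String (List (List (String × List String)))) s =>
      (pyTags s).foldl (fun d tag =>
        if d.contains tag = false then d.insert tag [s]
        else d.modify tag [] (fun v => v ++ [s])) d)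
    = (fun d s => (pyTags s).foldl (fun d tag => d.modify tag [] (fun v => v ++ [s])) d) by
      funext d s; congr 1; funext d tag; exact pvStepA d tag s]
  exact pvFoldl_nested _ slides PySem.Dict.empty

lemma pvB_d (slides : List (List (String × List String)))
    (d0 : PySem.Dict String (List (List (String × List String)))) :
    (PySem.List.sorted slides (fun sl => (pyTags sl).length)).foldl (fun d s =>
      (pyTags s).foldl (fun d tag => d.modify tag [] (fun v => v ++ [s])) d) d0
    = (pvPairs (PySem.List.sorted slides (fun sl => (pyTags sl).length))).foldl
        (fun d p => d.modify p.1 [] (fun v => v ++ [p.2])) d0 :=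
  pvFoldl_nested _ _ d0

-- ===== VERDICT (by name: the statement is the Claim_ definition above) =====
theorem form_tag_map_spec : Claim_equal_form_tag_map := by
  intro slides _ _
  unfold Spec_form_tag_map form_tag_map form_tag_map_alt
  dsimp only
  rw [pvA_d1, pvFoldl_nested (fun d tag _ => d.setdefault tag []) slides PySem.Dict.empty, pvB_d]
  set d1 := (pvPairs slides).foldl (fun d p => d.modify p.1 [] (fun v => v ++ [p.2]))
      (PySem.Dict.empty (κ := String) (ν := List (List (String × List String)))) with hd1
  set d0 := (pvPairs slides).foldl (fun d p => d.setdefault p.1 [])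
      (PySem.Dict.empty (κ := String) (ν := List (List (String × List String)))) with hd0
  set ss := PySem.List.sorted slides (fun sl => (pyTags sl).length) with hss
  set dB := (pvPairs ss).foldl (fun d p => d.modify p.1 [] (fun v => v ++ [p.2])) d0 with hdB
  set d2 := d1.keys.foldl (fun d tag =>
      d.insert tag (PySem.List.sorted (d.getD tag []) (fun sl => (pyTags sl).length))) d1 with hd2
  -- keys of d1
  have hk1 : d1.keys = PySem.Set.update [] ((pvPairs slides).map (fun p => p.1)) := by
    rw [hd1, PySem.Dict.keys_foldl_modify_key (pvPairs slides) (fun p => p.1) []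
      (fun _ p => fun v => v ++ [p.2]) PySem.Dict.empty, PySem.Dict.keys_empty]
  have hnd1 : d1.keys.Nodup := by
    rw [hd1]
    exact PySem.Dict.nodup_keys_foldl_modify_key _ _ _ _ _ (by simp)
  -- keys of d0 equal keys of d1
  have hk0 : d0.keys = d1.keys := by
    rw [hd0, pvKeys_setdefault_loop, PySem.Dict.keys_empty, hk1]
  -- every tag of ss is already a key of d0
  have hmemK : ∀ x ∈ (pvPairs ss).map (fun p => p.1), x ∈ d0.keys := by
    intro x hx
    rw [pvPairs_fst] at hx
    rcases List.mem_flatMap.mp hx with ⟨s, hs, hxs⟩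
    have hs' : s ∈ slides :=
      (PySem.List.sorted_perm slides (fun sl => (pyTags sl).length) false).mem_iff.mp (hss ▸ hs)
    rw [hk0, hk1]
    have h1 : PySem.Set.update ([] : List String) ((pvPairs slides).map (fun p => p.1))
        = PySem.Set.ofList ((pvPairs slides).map (fun p => p.1)) := rfl
    rw [h1, PySem.Set.mem_ofList, pvPairs_fst]
    exact List.mem_flatMap.mpr ⟨s, hs', hxs⟩
  -- keys of dB
  have hkB : dB.keys = d1.keys := by
    rw [hdB, PySem.Dict.keys_foldl_modify_key (pvPairs ss) (fun p => p.1) []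
      (fun _ p => fun v => v ++ [p.2]) d0, pvSet_update_subset _ _ hmemK, hk0]
  -- keys of d2
  have hk2 : d2.keys = d1.keys := by
    rw [hd2, PySem.Dict.keys_foldl_insert d1.keys
      (fun d tag => PySem.List.sorted (d.getD tag []) (fun sl => (pyTags sl).length)) d1]
    exact pvSet_update_subset _ _ (fun x hx => hx)
  have hnd2 : d2.keys.Nodup := hk2 ▸ hnd1
  have hndB : dB.keys.Nodup := hkB ▸ hnd1
  -- values
  have hv1 : ∀ t, d1.getD t [] = pvBucket t slides := by
    intro t
    rw [hd1, PySem.Dict.getD_foldl_modify_append, PySem.Dict.getD_empty]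
    rfl
  have hv2 : ∀ t ∈ d1.keys,
      d2.getD t [] = PySem.List.sorted (pvBucket t slides) (fun sl => (pyTags sl).length) := by
    intro t ht
    rw [hd2, pvGetD_phase2 d1.keys hnd1
      (fun v => PySem.List.sorted v (fun sl => (pyTags sl).length)) d1, if_pos ht, hv1]
  have hvB : ∀ t, dB.getD t [] = pvBucket t ss := by
    intro t
    rw [hdB, PySem.Dict.getD_foldl_modify_append, hd0, pvGetD_setdefault_loop,
      PySem.Dict.getD_empty]
    rfl
  -- items equal
  rw [PySem.Dict.items_eq_map_keys d2 hnd2 [], PySem.Dict.items_eq_map_keys dB hndB [],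
    hk2, hkB]
  apply List.map_congr_left
  intro k hk
  rw [hv2 k hk, hvB, hss, pvBucket_sorted]
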